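-- pv_equiv track=rewrite | github.com/pvestal/tower-echo-brain | model_decision_engine.py | _enhance_query_for_code
-- ===== SOURCE A (Python) =====
-- from typing import Dict, List, Optional, Tuple
--
-- def _enhance_query_for_code(query: str, issues: List[str]) -> str:
--     """Enhance the query to avoid previous issues"""
--
--     enhancements = []
--
--     if any("gibberish" in str(issue).lower() for issue in issues):
--         enhancements.append("Generate syntactically correct code only.")
--
--     if any("syntax" in str(issue).lower() for issue in issues):
--         enhancements.append("Ensure proper syntax with balanced brackets.")
--
--     if any("no language" in str(issue).lower() for issue in issues):
--         enhancements.append("Clearly use proper programming language syntax.")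
--
--     enhancement_text = " ".join(enhancements)
--
--     return f"{query}\n\nIMPORTANT: {enhancement_text} Output ONLY valid code without explanation."
-- ===== SOURCE B (Python) =====
-- def _enhance_query_for_code(query, issues):
--     has_gibberish = has_syntax = has_no_language = False
--     for issue in issues:
--         s = str(issue).lower()
--         if "gibberish" in s:
--             has_gibberish = True
--         if "syntax" in s:
--             has_syntax = True
--         if "no language" in s:
--             has_no_language = True
--     enhancements = []
--     if has_gibberish:
--         enhancements.append("Generate syntactically correct code only.")
--     if has_syntax:
--         enhancements.append("Ensure proper syntax with balanced brackets.")
--     if has_no_language: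
--         enhancements.append("Clearly use proper programming language syntax.")
--     return f"{query}\n\nIMPORTANT: {' '.join(enhancements)} Output ONLY valid code without explanation."
-- ===== Notes on version B (the rewrite author's own statement) =====
-- stated objective: simpler
-- what changed: Replaces three separate any() scans over issues with one pass that lowercases each issue once and maintains three boolean flags, then assembles the guidance strings in the fixed order.
import Mathlib
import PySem

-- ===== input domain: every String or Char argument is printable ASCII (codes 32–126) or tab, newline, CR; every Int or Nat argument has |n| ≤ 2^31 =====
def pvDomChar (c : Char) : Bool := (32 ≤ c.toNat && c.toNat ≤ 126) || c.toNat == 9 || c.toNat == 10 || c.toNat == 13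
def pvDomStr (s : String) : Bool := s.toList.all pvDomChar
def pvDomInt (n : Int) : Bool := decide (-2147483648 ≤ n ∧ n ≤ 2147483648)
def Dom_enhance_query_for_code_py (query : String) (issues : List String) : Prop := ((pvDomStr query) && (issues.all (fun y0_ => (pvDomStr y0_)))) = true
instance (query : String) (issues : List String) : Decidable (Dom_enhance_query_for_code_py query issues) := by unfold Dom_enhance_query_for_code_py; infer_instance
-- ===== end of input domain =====

-- B replaces A's three any() scans with one pass over issues that lowercases each issue once and keeps three flags (simpler, one traversal).

-- ===== PORT A =====
def enhance_query_for_code_py (query : String) (issues : List String) : String :=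
  let enhancements : List String := []
  let enhancements := if issues.any (fun issue => PySem.Str.isIn "gibberish" (PySem.Str.lower issue))
    then enhancements ++ ["Generate syntactically correct code only."] else enhancements
  let enhancements := if issues.any (fun issue => PySem.Str.isIn "syntax" (PySem.Str.lower issue))
    then enhancements ++ ["Ensure proper syntax with balanced brackets."] else enhancements
  let enhancements := if issues.any (fun issue => PySem.Str.isIn "no language" (PySem.Str.lower issue))
    then enhancements ++ ["Clearly use proper programming language syntax."] else enhancements
  let enhancement_text := PySem.Str.join " " enhancements
  query ++ "\n\nIMPORTANT: " ++ enhancement_text ++ " Output ONLY valid code without explanation."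

-- ===== PORT B =====
def enhance_query_for_code_py_alt (query : String) (issues : List String) : String :=
  let flags := issues.foldl (fun (f : Bool × Bool × Bool) issue =>
      let s := PySem.Str.lower issue
      (f.1 || PySem.Str.isIn "gibberish" s,
       f.2.1 || PySem.Str.isIn "syntax" s,
       f.2.2 || PySem.Str.isIn "no language" s)) (false, false, false)
  let enhancements : List String :=
    (if flags.1 then ["Generate syntactically correct code only."] else []) ++
    (if flags.2.1 then ["Ensure proper syntax with balanced brackets."] else []) ++
    (if flags.2.2 then ["Clearly use proper programming language syntax."] else [])
  query ++ "\n\nIMPORTANT: " ++ PySem.Str.join " " enhancements ++ " Output ONLY valid code without explanation."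

-- ===== PRECONDITION & SPEC =====
def Spec_enhance_query_for_code_py (query : String) (issues : List String) (out : String) : Prop := out = enhance_query_for_code_py_alt query issues
instance (query : String) (issues : List String) (out : String) : Decidable (Spec_enhance_query_for_code_py query issues out) := by unfold Spec_enhance_query_for_code_py; infer_instance

-- ===== CLAIM (what is proved, stated in full; the proofs are below) =====
def Claim_equal_enhance_query_for_code_py : Prop := ∀ (query : String) (issues : List String), Dom_enhance_query_for_code_py query issues → Spec_enhance_query_for_code_py query issues (enhance_query_for_code_py query issues)

-- ===== LEMMAS AND PROOFS =====

/-- The one-pass triple-flag fold computes the three `any` scans. -/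
theorem foldl_flags_eq (issues : List String) (b : Bool × Bool × Bool) :
    issues.foldl (fun (f : Bool × Bool × Bool) issue =>
      let s := PySem.Str.lower issue
      (f.1 || PySem.Str.isIn "gibberish" s,
       f.2.1 || PySem.Str.isIn "syntax" s,
       f.2.2 || PySem.Str.isIn "no language" s)) b
    = (b.1 || issues.any (fun issue => PySem.Str.isIn "gibberish" (PySem.Str.lower issue)),
       b.2.1 || issues.any (fun issue => PySem.Str.isIn "syntax" (PySem.Str.lower issue)),
       b.2.2 || issues.any (fun issue => PySem.Str.isIn "no language" (PySem.Str.lower issue))) := by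
  induction issues generalizing b with
  | nil => simp
  | cons x xs ih =>
    simp only [List.foldl_cons, List.any_cons, ih]
    simp [Bool.or_assoc]

-- ===== VERDICT (by name: the statement is the Claim_ definition above) =====
theorem enhance_query_for_code_py_spec : Claim_equal_enhance_query_for_code_py := by
  intro query issues _
  unfold Spec_enhance_query_for_code_py enhance_query_for_code_py enhance_query_for_code_py_alt
  simp only [foldl_flags_eq, Bool.false_or]
  by_cases h1 : issues.any (fun issue => PySem.Str.isIn "gibberish" (PySem.Str.lower issue)) = true <;>
  by_cases h2 : issues.any (fun issue => PySem.Str.isIn "syntax" (PySem.Str.lower issue)) = true <;>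
  by_cases h3 : issues.any (fun issue => PySem.Str.isIn "no language" (PySem.Str.lower issue)) = true <;>
  simp only [h1, h2, h3] <;> simp
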